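-- pv_equiv track=rewrite | github.com/BackupTheBerlios/solipsis-svn | trunk/main/solipsis/services/profile/filter/data.py | create_key_regex
-- ===== SOURCE A (Python) =====
-- def create_key_regex(input_value):
--     """'input_input' is a keyword that contains no joker .
--     Te function traduces it into a regex.
--
--     ie: mp3 -> .*mp3.*
--         bon.us -> .*bon\.us.*
--         *any(FR)* -> .*any\(FR\).*"""
--     if input_value == "":
--         return input_value
--     if input_value == "*":
--         return ".*"
--     # list of chars to replace (all except '*' and '\')
--     sensible_chars = "*.^$+?{[]|()"
--     for sensible_char in sensible_chars:
--         input_value = input_value.replace(sensible_char, "\\" + sensible_char)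
--     # add regex expression
--     return '.*' + input_value + '.*'
-- ===== SOURCE B (Python) =====
-- def create_key_regex(input_value):
--     if input_value == "":
--         return input_value
--     if input_value == "*":
--         return ".*"
--     specials = set("*.^$+?{[]|()")
--     escaped = ''.join('\\' + c if c in specials else c for c in input_value)
--     return '.*' + escaped + '.*'
-- ===== Notes on version B (the rewrite author's own statement) =====
-- stated objective: idiomatic
-- what changed: A makes 11 full-string .replace passes, one per escape character; B builds the escaped string in a single left-to-right pass over the input with a set membership test, keeping the two guard clauses.
import Mathlib
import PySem

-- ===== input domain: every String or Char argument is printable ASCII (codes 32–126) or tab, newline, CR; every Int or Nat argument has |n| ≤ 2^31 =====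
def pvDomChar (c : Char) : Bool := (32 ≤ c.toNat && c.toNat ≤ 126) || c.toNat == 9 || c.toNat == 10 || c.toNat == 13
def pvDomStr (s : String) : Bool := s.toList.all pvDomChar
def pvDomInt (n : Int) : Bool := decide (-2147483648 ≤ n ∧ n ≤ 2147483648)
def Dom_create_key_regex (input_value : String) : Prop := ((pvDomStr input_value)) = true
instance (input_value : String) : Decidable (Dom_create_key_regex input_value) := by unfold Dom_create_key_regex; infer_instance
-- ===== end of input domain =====

-- B replaces A's 11 full-string `.replace` passes by one left-to-right pass over the
-- input with a set membership test (objective: idiomatic single pass; same result).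

-- ===== PORT A =====
def create_key_regex (input_value : String) : String :=
  if input_value = "" then input_value
  else if input_value = "*" then ".*"
  else
    -- for sensible_char in "*.^$+?{[]|()": input_value = input_value.replace(...)
    let escaped := ("*.^$+?{[]|()".toList).foldl
      (fun s c => PySem.Str.replace s (String.ofList [c]) (String.ofList ['\\', c])) input_value
    -- Python '+' on strings, ported by hand as concatenation of the code-point lists (exact)
    String.ofList (".*".toList ++ escaped.toList ++ ".*".toList)

-- ===== PORT B =====
def create_key_regex_alt (input_value : String) : String :=
  if input_value = "" then input_value
  else if input_value = "*" then ".*"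
  else
    let specials : PySem.Set Char := PySem.Set.ofList "*.^$+?{[]|()".toList
    -- ''.join('\\' + c if c in specials else c for c in input_value), wrapped in '.*' … '.*'
    String.ofList ('.' :: '*' ::
      (input_value.toList.flatMap (fun c => if c ∈ specials then ['\\', c] else [c]) ++ ['.', '*']))

-- ===== PRECONDITION & SPEC =====
def Spec_create_key_regex (input_value : String) (out : String) : Prop := out = create_key_regex_alt input_value
instance (input_value : String) (out : String) : Decidable (Spec_create_key_regex input_value out) := by unfold Spec_create_key_regex; infer_instance

-- ===== CLAIM (what is proved, stated in full; the proofs are below) =====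
def Claim_equal_create_key_regex : Prop := ∀ (input_value : String), Dom_create_key_regex input_value → Spec_create_key_regex input_value (create_key_regex input_value)

-- ===== LEMMAS AND PROOFS =====

-- single-char pattern: Python replace rewrites each occurrence independently
theorem replace_go_single (c : Char) (new : List Char) :
    ∀ (l acc : List Char) (fuel : Nat), l.length ≤ fuel →
    PySem.Chars.replace.go [c] new fuel l acc
      = acc.reverse ++ l.flatMap (fun x => if x = c then new else [x]) := by
  intro l
  induction l with
  | nil =>
      intro acc fuel _
      cases fuel <;> simp [PySem.Chars.replace.go]
  | cons x t ih =>
      intro acc fuel hf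
      cases fuel with
      | zero => simp at hf
      | succ fuel =>
        have hft : t.length ≤ fuel := by simp at hf; omega
        by_cases hx : x = c
        · subst hx
          have hp : ([x].isPrefixOf (x :: t)) = true := by simp [List.isPrefixOf]
          simp only [PySem.Chars.replace.go, hp, if_pos]
          rw [show List.drop [x].length (x :: t) = t by simp]
          rw [ih (new.reverse ++ acc) fuel hft]
          simp
        · have hp : ([c].isPrefixOf (x :: t)) = false := by
            simp [List.isPrefixOf]; exact fun h => hx h.symm
          simp only [PySem.Chars.replace.go, hp]
          rw [ih (x :: acc) fuel hft]
          simp [hx]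

theorem replace_single (l : List Char) (c : Char) (new : List Char) :
    PySem.Chars.replace l [c] new = l.flatMap (fun x => if x = c then new else [x]) := by
  simp [PySem.Chars.replace]
  simpa using replace_go_single c new l [] l.length le_rfl

-- the multi-pass escape loop equals the one-pass escape, for distinct chars not containing '\'
theorem foldl_replace_eq_flatMap (cs : List Char) (hnd : cs.Nodup) (hb : '\\' ∉ cs) :
    ∀ (l : List Char),
    cs.foldl (fun s c => PySem.Chars.replace s [c] ['\\', c]) l
      = l.flatMap (fun x => if x ∈ cs then ['\\', x] else [x]) := by
  induction cs with
  | nil => intro l; simp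
  | cons c cs ih =>
      intro l
      have hc : c ∉ cs := (List.nodup_cons.mp hnd).1
      have hbs : '\\' ∉ cs := fun h => hb (List.mem_cons_of_mem _ h)
      have hbc : '\\' ≠ c := fun h => hb (h ▸ List.mem_cons_self)
      rw [List.foldl_cons, replace_single, ih (List.nodup_cons.mp hnd).2 hbs,
        List.flatMap_assoc]
      congr 1
      funext x
      by_cases hx : x = c
      · subst hx
        simp [hbs, hc]
      · simp [hx, List.mem_cons]

theorem main_escape (input_value : String) :
    (("*.^$+?{[]|()".toList).foldl
        (fun s c => PySem.Str.replace s (String.ofList [c]) (String.ofList ['\\', c])) input_value).toList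
      = input_value.toList.flatMap
          (fun c => if c ∈ PySem.Set.ofList "*.^$+?{[]|()".toList then ['\\', c] else [c]) := by
  have hfold : ∀ (cs : List Char) (s : String),
      (cs.foldl (fun s c => PySem.Str.replace s (String.ofList [c]) (String.ofList ['\\', c])) s).toList
        = cs.foldl (fun l c => PySem.Chars.replace l [c] ['\\', c]) s.toList := by
    intro cs
    induction cs with
    | nil => intro s; rfl
    | cons c cs ih =>
        intro s
        rw [List.foldl_cons, List.foldl_cons, ih]
        simp [PySem.Str.toList_replace, String.toList_ofList]
  rw [hfold]
  rw [foldl_replace_eq_flatMap _ (by decide) (by decide)]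
  have hfun : (fun x => if x ∈ "*.^$+?{[]|()".toList then ['\\', x] else [x])
      = (fun c => if c ∈ PySem.Set.ofList "*.^$+?{[]|()".toList then ['\\', c] else [c]) := by
    funext x
    simp [PySem.Set.mem_ofList]
  rw [hfun]

-- ===== VERDICT (by name: the statement is the Claim_ definition above) =====
theorem create_key_regex_spec : Claim_equal_create_key_regex := by
  intro input_value _
  unfold Spec_create_key_regex create_key_regex create_key_regex_alt
  by_cases h0 : input_value = ""
  · simp [h0]
  · by_cases h1 : input_value = "*"
    · simp [h1]
    · simp only [h0, h1, if_false]
      rw [main_escape]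
      rfl
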